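-- pv_equiv track=rewrite | github.com/studfaensen/prot-fin-dev | experiments/recog_without_fft/methods/protfin.py | score_prots
-- ===== SOURCE A (Python) =====
-- def score_prots(hashes, database):
--     matches_per_prot = {}
--     for hash_, (sample_index, _) in hashes.items():
--         if hash_ in database:
--             matching_occurences = database[hash_]
--             for source_index, prot_index in matching_occurences:
--                 if prot_index not in matches_per_prot:
--                     matches_per_prot[prot_index] = []
--                 matches_per_prot[prot_index].append((sample_index, source_index))
--
--     scores = {}
--     for prot_index, matches in matches_per_prot.items():
--         prot_scores_by_offset = {}
--         for sample_index, source_index in matches: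
--             delta = source_index - sample_index
--             if delta not in prot_scores_by_offset:
--                 prot_scores_by_offset[delta] = 0
--             prot_scores_by_offset[delta] += 1
--
--         max_ = (0, 0)
--         for offset, score in prot_scores_by_offset.items():
--             if score > max_[1]:
--                 max_ = (offset, score)
--         scores[prot_index] = max_
--
--     # Sort the scores for the user
--     scores = list(sorted(scores.items(), key=lambda x: x[1][1], reverse=True))
--
--     return scores
-- ===== SOURCE B (Python) =====
-- def score_prots(hashes, database):
--     # Flat relational pipeline: materialise one (prot, delta) pair list, then use
--     # first-occurrence dedup (dict.fromkeys) and list.count as the histogram and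
--     # max(key=...) as the modal offset -- no nested grouping or counter dicts.
--     pairs = [(prot, source - sample)
--              for hash_, (sample, _) in hashes.items()
--              for source, prot in database.get(hash_, ())]
--     result = []
--     for prot in dict.fromkeys(p for p, _ in pairs):
--         deltas = [d for p, d in pairs if p == prot]
--         # deltas is never empty (prot comes from pairs), so max cannot raise
--         offset = max(dict.fromkeys(deltas), key=deltas.count)
--         result.append((prot, (offset, deltas.count(offset))))
--     result.sort(key=lambda item: item[1][1], reverse=True)
--     return result
-- ===== Notes on version B (the rewrite author's own statement) =====
-- stated objective: simpler
-- what changed: Replaces A's two-phase dict machinery (grouping dict of match lists, per-protein offset-counter dicts, hand-written argmax folds) with a flat relational pipeline: one (prot, delta) pair list, first-occurrence dedup, list.count as the histogram and max(key=...) as the modal offset.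
import Mathlib
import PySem

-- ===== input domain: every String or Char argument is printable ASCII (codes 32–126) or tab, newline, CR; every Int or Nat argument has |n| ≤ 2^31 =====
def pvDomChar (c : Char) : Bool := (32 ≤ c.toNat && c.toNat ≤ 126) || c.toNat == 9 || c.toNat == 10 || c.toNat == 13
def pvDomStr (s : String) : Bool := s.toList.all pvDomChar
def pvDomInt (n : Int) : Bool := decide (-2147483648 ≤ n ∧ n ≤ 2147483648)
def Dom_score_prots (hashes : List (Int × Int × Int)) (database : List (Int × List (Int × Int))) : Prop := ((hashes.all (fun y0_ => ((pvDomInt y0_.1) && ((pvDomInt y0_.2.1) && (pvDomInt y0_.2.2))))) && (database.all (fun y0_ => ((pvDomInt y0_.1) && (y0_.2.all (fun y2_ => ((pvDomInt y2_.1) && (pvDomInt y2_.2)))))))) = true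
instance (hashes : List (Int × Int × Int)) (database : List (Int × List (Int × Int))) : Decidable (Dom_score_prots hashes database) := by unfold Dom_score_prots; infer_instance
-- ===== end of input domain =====

-- B replaces A's nested grouping/counter dicts by a flat (prot, delta) pair list with
-- first-occurrence dedup, list.count as the histogram and max(key=...) as the modal offset (objective: simpler).

-- ===== PORT A =====
-- matches_per_prot loop of A ('if prot_index not in: = []' then append, over hashes.items() and database lookups)
def pvA_mpp (hashes : List (Int × Int × Int)) (database : List (Int × List (Int × Int))) : PySem.Dict Int (List (Int × Int)) :=
  hashes.foldl (fun mpp e =>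
    if (PySem.Dict.mk database).contains e.1 then
      -- key is present, so d[hash_] = getD d hash_ []
      ((PySem.Dict.mk database).getD e.1 []).foldl (fun mpp o =>
        (if mpp.contains o.2 then mpp else mpp.insert o.2 []).modify o.2 [] (fun l => l ++ [(e.2.1, o.1)])) mpp
    else mpp) PySem.Dict.empty

-- prot_scores_by_offset loop of A ('if delta not in: = 0' then += 1)
def pvA_pso (ms : List (Int × Int)) : PySem.Dict Int Int :=
  ms.foldl (fun pso m =>
    (if pso.contains (m.2 - m.1) then pso else pso.insert (m.2 - m.1) 0).modify (m.2 - m.1) 0 (· + 1)) PySem.Dict.empty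

-- the max_ selection loop of A (strict '>', starting from (0, 0))
def pvA_max (pso : PySem.Dict Int Int) : Int × Int :=
  pso.items.foldl (fun max_ p => if p.2 > max_.2 then p else max_) (0, 0)

def score_prots (hashes : List (Int × Int × Int)) (database : List (Int × List (Int × Int))) : List (Int × (Int × Int)) :=
  PySem.List.sorted
    ((pvA_mpp hashes database).items.foldl
      (fun scores pm => scores.insert pm.1 (pvA_max (pvA_pso pm.2))) PySem.Dict.empty).items
    (fun x => x.2.2) true

-- ===== PORT B =====
-- the flat (prot, delta) pair comprehension of B
def pvB_pairs (hashes : List (Int × Int × Int)) (database : List (Int × List (Int × Int))) : List (Int × Int) :=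
  hashes.flatMap (fun e => ((PySem.Dict.mk database).getD e.1 []).map (fun o => (o.2, o.1 - e.2.1)))

-- body of B's loop over dict.fromkeys of the prots
def pvB_entry (pairs : List (Int × Int)) (prot : Int) : Int × (Int × Int) :=
  let deltas := (pairs.filter (fun p => p.1 == prot)).map (fun p => p.2)
  -- deltas is never empty for prot drawn from pairs, so Python's max never raises; the default 0 is unreachable
  let offset := PySem.List.maxD (PySem.List.dedup deltas) (fun d => deltas.count d) 0
  (prot, (offset, (deltas.count offset : Int)))

def score_prots_alt (hashes : List (Int × Int × Int)) (database : List (Int × List (Int × Int))) : List (Int × (Int × Int)) :=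
  PySem.List.sorted
    ((PySem.List.dedup ((pvB_pairs hashes database).map (fun p => p.1))).foldl
      (fun result prot => result ++ [pvB_entry (pvB_pairs hashes database) prot]) [])
    (fun item => item.2.2) true

-- ===== PRECONDITION & SPEC =====
-- Pre_ excludes association lists with duplicate keys: they do not represent any Python dict
-- (both parameters are dicts in Python, so no Python input is excluded).
def Pre_score_prots (hashes : List (Int × Int × Int)) (database : List (Int × List (Int × Int))) : Prop :=
  (hashes.map (fun e => e.1)).Nodup ∧ (database.map (fun e => e.1)).Nodup
instance (hashes : List (Int × Int × Int)) (database : List (Int × List (Int × Int))) : Decidable (Pre_score_prots hashes database) := by unfold Pre_score_prots; infer_instance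

def pvWitness_score_prots : (List (Int × Int × Int)) × (List (Int × List (Int × Int))) :=
  ([(1, 0, 0)], [(1, [(3, 5)])])

def Spec_score_prots (hashes : List (Int × Int × Int)) (database : List (Int × List (Int × Int))) (out : List (Int × (Int × Int))) : Prop := out = score_prots_alt hashes database
instance (hashes : List (Int × Int × Int)) (database : List (Int × List (Int × Int))) (out : List (Int × (Int × Int))) : Decidable (Spec_score_prots hashes database out) := by unfold Spec_score_prots; infer_instance

-- ===== CLAIM (what is proved, stated in full; the proofs are below) =====
def Claim_equal_score_prots : Prop := ∀ (hashes : List (Int × Int × Int)) (database : List (Int × List (Int × Int))), Dom_score_prots hashes database → Pre_score_prots hashes database → Spec_score_prots hashes database (score_prots hashes database)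

-- ===== LEMMAS AND PROOFS =====

-- the shared event stream: (prot, sample, source) for every occurrence of every matched hash
def pvEv (hashes : List (Int × Int × Int)) (database : List (Int × List (Int × Int))) : List (Int × Int × Int) :=
  hashes.flatMap (fun e => ((PySem.Dict.mk database).getD e.1 []).map (fun o => (o.2, e.2.1, o.1)))

-- A's "if k not in d: d[k] = v0" followed by an update of d[k] is just Dict.modify
theorem pv_sdmod {ν : Type} (d : PySem.Dict Int ν) (k : Int) (v0 : ν) (f : ν → ν) :
    (if d.contains k then d else d.insert k v0).modify k v0 f = d.modify k v0 f := by
  by_cases h : d.contains k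
  · simp [h]
  · simp only [h, if_neg, Bool.false_eq_true, not_false_iff]
    simp only [PySem.Dict.modify, PySem.Dict.getD_insert_self, PySem.Dict.insert_insert_self,
      PySem.Dict.getD_of_not_contains _ _ (by simpa using h)]

theorem pvA_mpp_eq (hashes : List (Int × Int × Int)) (database : List (Int × List (Int × Int))) :
    pvA_mpp hashes database
      = (pvEv hashes database).foldl (fun d x => d.modify x.1 [] (fun l => l ++ [(x.2.1, x.2.2)])) PySem.Dict.empty := by
  unfold pvA_mpp pvEv
  rw [List.foldl_flatMap]
  congr 1
  funext mpp e
  by_cases h : (PySem.Dict.mk database).contains e.1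
  · simp only [h, if_pos, List.foldl_map, pv_sdmod]
  · have hc : (PySem.Dict.mk database).contains e.1 = false := by exact eq_false_of_ne_true h
    rw [if_neg (by simp [hc]), PySem.Dict.getD_of_not_contains _ _ hc]
    simp

theorem pvA_mpp_getD (hashes : List (Int × Int × Int)) (database : List (Int × List (Int × Int))) (prot : Int) :
    (pvA_mpp hashes database).getD prot []
      = ((pvEv hashes database).filter (fun x => x.1 == prot)).map (fun x => (x.2.1, x.2.2)) := by
  rw [pvA_mpp_eq]
  have h1 : (pvEv hashes database).foldl (fun d x => d.modify x.1 [] (fun l => l ++ [(x.2.1, x.2.2)])) PySem.Dict.empty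
      = ((pvEv hashes database).map (fun x => (x.1, (x.2.1, x.2.2)))).foldl
          (fun d (p : Int × (Int × Int)) => d.modify p.1 [] (fun l => l ++ [p.2])) PySem.Dict.empty := by
    rw [List.foldl_map]
  rw [h1, PySem.Dict.getD_foldl_modify_append, List.filter_map, List.map_map]
  simp [PySem.Dict.getD_empty]
  rfl

theorem pvA_mpp_keys (hashes : List (Int × Int × Int)) (database : List (Int × List (Int × Int))) :
    (pvA_mpp hashes database).keys = PySem.Set.ofList ((pvEv hashes database).map (fun x => x.1)) := by
  rw [pvA_mpp_eq]
  rw [PySem.Dict.keys_foldl_modify_key (pvEv hashes database) (fun x => x.1) []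
    (fun _ x => fun l => l ++ [(x.2.1, x.2.2)]) PySem.Dict.empty]
  simp [PySem.Dict.keys_empty, PySem.Set.update_nil_left]

theorem pvA_mpp_keys_nodup (hashes : List (Int × Int × Int)) (database : List (Int × List (Int × Int))) :
    (pvA_mpp hashes database).keys.Nodup := by
  rw [pvA_mpp_keys]
  exact PySem.Set.nodup_ofList _

theorem pvA_pso_eq (ms : List (Int × Int)) :
    pvA_pso ms = PySem.Dict.counter (ms.map (fun m => m.2 - m.1)) := by
  unfold pvA_pso
  rw [PySem.Dict.counter_eq_foldl, List.foldl_map]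
  simp only [pv_sdmod]

-- the key-fold both argmax computations reduce to (first maximum wins)
def pvBest (c : Int → Nat) (m : Int) (rest : List Int) : Int :=
  rest.foldl (fun a x => if c a < c x then x else a) m

theorem pv_foldl_pairs (c : Int → Nat) (rest : List Int) : ∀ (m : Int),
    rest.foldl (fun (mx : Int × Int) k => if (c k : Int) > mx.2 then (k, (c k : Int)) else mx) (m, (c m : Int))
      = (pvBest c m rest, (c (pvBest c m rest) : Int)) := by
  induction rest with
  | nil => intro m; simp [pvBest]
  | cons k rest ih =>
    intro m
    have hb : ∀ mm : Int, List.foldl (fun a x => if c a < c x then x else a) mm rest = pvBest c mm rest := fun _ => rfl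
    simp only [List.foldl_cons, pvBest, gt_iff_lt, Int.ofNat_lt]
    by_cases h : c m < c k <;> simp [h, hb, ih]

theorem pv_max?_eq (c : Int → Nat) : ∀ (rest : List Int) (m : Int),
    PySem.List.max? (m :: rest) c = some (pvBest c m rest) := by
  intro rest
  induction rest with
  | nil => intro m; rfl
  | cons k rest ih =>
    intro m
    have h1 : PySem.List.max? (m :: k :: rest) c
        = (if c m < c k then PySem.List.max? (k :: rest) c else PySem.List.max? (m :: rest) c) := by
      unfold PySem.List.max?
      by_cases h : c m < c k <;> simp [h]
    have h2 : pvBest c m (k :: rest) = (if c m < c k then pvBest c k rest else pvBest c m rest) := by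
      unfold pvBest
      by_cases h : c m < c k <;> simp [h]
    rw [h1, h2]
    by_cases h : c m < c k <;> simp [h, ih]

theorem pv_foldl_pairs0 (c : Int → Nat) (m : Int) (rest : List Int) (hpos : 0 < c m) :
    (m :: rest).foldl (fun (mx : Int × Int) k => if (c k : Int) > mx.2 then (k, (c k : Int)) else mx) (0, 0)
      = (pvBest c m rest, (c (pvBest c m rest) : Int)) := by
  rw [List.foldl_cons]
  simp only [gt_iff_lt]
  rw [if_pos (by exact_mod_cast hpos)]
  have := pv_foldl_pairs c rest m
  simpa only [gt_iff_lt] using this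

-- per-protein agreement of A's argmax over the counter with B's max(dedup, key=count)
theorem pv_entry_core (ds : List Int) (hne : ds ≠ []) :
    pvA_max (PySem.Dict.counter ds)
      = (PySem.List.maxD (PySem.List.dedup ds) (fun d => ds.count d) 0,
          (ds.count (PySem.List.maxD (PySem.List.dedup ds) (fun d => ds.count d) 0) : Int)) := by
  have hset : ∃ m rest, PySem.Set.ofList ds = m :: rest := by
    cases hd : PySem.Set.ofList ds with
    | nil =>
      exfalso
      obtain ⟨x, hx⟩ := List.exists_mem_of_ne_nil ds hne
      have : x ∈ PySem.Set.ofList ds := (PySem.Set.mem_ofList _ _).2 hx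
      simp [hd] at this
    | cons m rest => exact ⟨m, rest, rfl⟩
  obtain ⟨m, rest, hd⟩ := hset
  have hmem : m ∈ ds := (PySem.Set.mem_ofList _ _).1 (by simp [hd])
  have hpos : 0 < ds.count m := List.count_pos_iff.2 hmem
  unfold pvA_max
  rw [PySem.Dict.items_counter, hd, List.foldl_map]
  have hfp := pv_foldl_pairs0 (fun d => ds.count d) m rest hpos
  simp only [] at hfp ⊢
  rw [hfp]
  rw [PySem.List.dedup_eq_ofList, hd]
  unfold PySem.List.maxD
  rw [pv_max?_eq]
  simp

theorem pvB_pairs_eq (hashes : List (Int × Int × Int)) (database : List (Int × List (Int × Int))) :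
    pvB_pairs hashes database = (pvEv hashes database).map (fun x => (x.1, x.2.2 - x.2.1)) := by
  unfold pvB_pairs pvEv
  rw [List.map_flatMap]
  congr 1
  funext e
  rw [List.map_map]
  rfl

-- the two pre-sort lists coincide
theorem pv_presort_eq (hashes : List (Int × Int × Int)) (database : List (Int × List (Int × Int))) :
    ((pvA_mpp hashes database).items.foldl
      (fun scores pm => scores.insert pm.1 (pvA_max (pvA_pso pm.2))) PySem.Dict.empty).items
    = (PySem.List.dedup ((pvB_pairs hashes database).map (fun p => p.1))).foldl
      (fun result prot => result ++ [pvB_entry (pvB_pairs hashes database) prot]) [] := by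
  have hkeys := pvA_mpp_keys hashes database
  have hnd := pvA_mpp_keys_nodup hashes database
  -- A side: the scores loop inserts fresh distinct keys, so items = map over mpp.items
  have hfresh : ∀ a ∈ (pvA_mpp hashes database).items,
      (PySem.Dict.empty : PySem.Dict Int (Int × Int)).contains a.1 = false := by
    intro a _; simp [PySem.Dict.contains_empty]
  have hmapnd : ((pvA_mpp hashes database).items.map (fun p => p.1)).Nodup := hnd
  rw [PySem.Dict.items_foldl_insert_fresh (pvA_mpp hashes database).items (fun pm => pm.1)
    (fun pm => pvA_max (pvA_pso pm.2)) PySem.Dict.empty hfresh hmapnd]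
  rw [PySem.Dict.items_eq_map_keys (pvA_mpp hashes database) hnd []]
  -- B side: the append loop is a map
  rw [PySem.List.foldl_append_singleton_eq_map]
  have hfst : (pvB_pairs hashes database).map (fun p => p.1) = (pvEv hashes database).map (fun x => x.1) := by
    rw [pvB_pairs_eq, List.map_map]; rfl
  rw [hfst, PySem.List.dedup_eq_ofList, hkeys, List.map_map]
  show _ = _
  simp only [PySem.Dict.empty, List.nil_append]
  apply List.map_congr_left
  intro prot hprot
  -- the per-protein delta list, shared by both sides
  have hds : ((pvA_mpp hashes database).getD prot []).map (fun m => m.2 - m.1)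
      = ((pvEv hashes database).filter (fun x => x.1 == prot)).map (fun x => x.2.2 - x.2.1) := by
    rw [pvA_mpp_getD, List.map_map]; rfl
  have hdeltas : ((pvB_pairs hashes database).filter (fun p => p.1 == prot)).map (fun p => p.2)
      = ((pvEv hashes database).filter (fun x => x.1 == prot)).map (fun x => x.2.2 - x.2.1) := by
    rw [pvB_pairs_eq, List.filter_map, List.map_map]; rfl
  have hne : ((pvEv hashes database).filter (fun x => x.1 == prot)).map (fun x => x.2.2 - x.2.1) ≠ [] := by
    have hmem : prot ∈ (pvEv hashes database).map (fun x => x.1) := (PySem.Set.mem_ofList _ _).1 hprot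
    obtain ⟨x, hx, hx1⟩ := List.mem_map.1 hmem
    have hxf : x ∈ (pvEv hashes database).filter (fun x => x.1 == prot) :=
      List.mem_filter.2 ⟨hx, by simp [hx1]⟩
    exact fun hcon => by simpa [hcon] using List.mem_map_of_mem (f := fun x => x.2.2 - x.2.1) hxf
  show ((fun k => (k, pvA_max (pvA_pso ((pvA_mpp hashes database).getD k [])))) prot : Int × Int × Int)
      = pvB_entry (pvB_pairs hashes database) prot
  simp only []
  rw [pvA_pso_eq, hds]
  unfold pvB_entry
  simp only [hdeltas]
  rw [pv_entry_core _ hne]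

-- ===== VERDICT (by name: the statement is the Claim_ definition above) =====
theorem score_prots_spec : Claim_equal_score_prots := by
  intro hashes database _hdom _hpre
  unfold Spec_score_prots score_prots score_prots_alt
  rw [pv_presort_eq]
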